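-- pv_equiv track=rewrite | github.com/kjosib/booze-tools | boozetools/macroparse/expansion.py | _expand_rules
-- ===== SOURCE A (Python) =====
-- def _expand_rules(raw):
-- 	"""
-- 	Implement a proposed interpretation of a tight rules table.
-- 	There's a related idea that might work in a C-like language where the rule IDs
-- 	in the ACTION table are pre-translated to the offset (from the end) of their
-- 	position in the rule data table. Then you just need a sentinel 0 at the end.
-- 	"""
-- 	result = []
-- 	i = 0
-- 	while i < len(raw):
-- 		nonterminal_id, rhs_length, constructor_id = raw[i:i+3]
-- 		view = []
-- 		i += 3
-- 		while i < len(raw) and raw[i] < 0: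
-- 			view.append(raw[i])
-- 			i += 1
-- 		result.append((nonterminal_id, rhs_length, constructor_id, tuple(view)))
-- 	return result
-- ===== SOURCE B (Python) =====
-- def _expand_rules(raw):
-- 	result = []
-- 	header = []
-- 	view = None
-- 	for x in raw:
-- 		if len(header) < 3:
-- 			header.append(x)
-- 			if len(header) == 3:
-- 				view = []
-- 		elif x < 0:
-- 			view.append(x)
-- 		else:
-- 			result.append((header[0], header[1], header[2], tuple(view)))
-- 			header = [x]
-- 			view = None
-- 	if view is not None:
-- 		result.append((header[0], header[1], header[2], tuple(view)))
-- 	elif header: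
-- 		raise ValueError("tight rules table ends mid-header")
-- 	return result
-- ===== Notes on version B (the rewrite author's own statement) =====
-- stated objective: alternative
-- what changed: Replaces A's index-driven outer/inner while loops with per-record slice unpacking by a single flat per-element pass over raw maintaining an explicit header/view state machine that flushes a record at each nonnegative element after a complete header and at end of input.
import Mathlib
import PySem

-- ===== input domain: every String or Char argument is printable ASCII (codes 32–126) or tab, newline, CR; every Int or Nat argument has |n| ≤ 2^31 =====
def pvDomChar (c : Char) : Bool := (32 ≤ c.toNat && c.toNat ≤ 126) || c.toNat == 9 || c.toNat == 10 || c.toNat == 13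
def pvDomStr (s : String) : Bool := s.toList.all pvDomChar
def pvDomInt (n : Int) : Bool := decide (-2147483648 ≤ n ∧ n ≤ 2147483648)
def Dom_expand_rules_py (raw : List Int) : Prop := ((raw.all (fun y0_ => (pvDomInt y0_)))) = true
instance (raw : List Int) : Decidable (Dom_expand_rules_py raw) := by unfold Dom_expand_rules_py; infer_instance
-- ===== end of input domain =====

-- B replaces A's index-driven nested while-loops by a single flat per-element pass
-- with an explicit header/view state machine (objective: alternative; not measured faster).

-- ===== PORT A =====
-- inner 'while i < len(raw) and raw[i] < 0: view.append(raw[i]); i += 1'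
-- raw[i] with 0 ≤ i < len(raw) is exactly Python's in-range indexing.
-- fuel = len(raw) only makes the recursion structural; it is never exhausted
-- (each iteration requires i < len(raw) and increments i).
def aInner (fuel : Nat) (raw : List Int) (i : Nat) (view : List Int) : List Int × Nat :=
  match fuel with
  | 0 => (view, i)
  | fuel + 1 =>
    if h : i < raw.length then
      if raw[i] < 0 then aInner fuel raw (i + 1) (view ++ [raw[i]]) else (view, i)
    else (view, i)

-- outer while loop of A; raw[i:i+3] with i ≥ 0 is (raw.drop i).take 3 (exact);
-- an unpack of fewer than 3 items raises ValueError in Python (outside Pre_, dummy []).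
-- fuel = len(raw) again only bounds the recursion; each iteration advances i by ≥ 3.
def aLoop (fuel : Nat) (raw : List Int) (i : Nat) : List (Int × Int × Int × List Int) :=
  match fuel with
  | 0 => []
  | fuel + 1 =>
    if i < raw.length then
      match (raw.drop i).take 3 with
      | [a, b, c] =>
        let p := aInner raw.length raw (i + 3) []
        (a, b, c, p.1) :: aLoop fuel raw p.2
      | _ => []
    else []

def expand_rules_py (raw : List Int) : List (Int × Int × Int × List Int) :=
  aLoop raw.length raw 0

-- ===== PORT B =====
-- state: (header, optional view of the open record, accumulated result)
def bStep (st : List Int × Option (List Int) × List (Int × Int × Int × List Int)) (x : Int) :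
    List Int × Option (List Int) × List (Int × Int × Int × List Int) :=
  let (hdr, view, acc) := st
  if hdr.length < 3 then
    let hdr' := hdr ++ [x]
    if hdr'.length = 3 then (hdr', some [], acc) else (hdr', none, acc)
  else if x < 0 then (hdr, view.map (· ++ [x]), acc)
  else
    match hdr, view with
    | [a, b, c], some v => ([x], none, acc ++ [(a, b, c, v)])
    | _, _ => ([x], none, acc)   -- unreachable: view is some iff header is complete

-- final flush; Python raises ValueError when the stream ends mid-header (outside Pre_, dummy acc)
def bFin (st : List Int × Option (List Int) × List (Int × Int × Int × List Int)) :
    List (Int × Int × Int × List Int) :=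
  match st with
  | ([a, b, c], some v, acc) => acc ++ [(a, b, c, v)]
  | (_, _, acc) => acc

def expand_rules_py_alt (raw : List Int) : List (Int × Int × Int × List Int) :=
  bFin (raw.foldl bStep ([], none, []))

-- ===== PRECONDITION & SPEC =====
-- DFA over the input: 'need' = header fields still required (0 = collecting negatives)
def wfStep (need : Nat) (x : Int) : Nat :=
  if need > 0 then need - 1 else if x < 0 then 0 else 2

-- Pre_ excludes exactly the inputs where A raises ValueError (the stream ends with 1 or 2
-- header fields pending, i.e. the unpack of raw[i:i+3] fails); B raises there too.
def Pre_expand_rules_py (raw : List Int) : Prop :=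
  raw = [] ∨ List.foldl wfStep 3 raw = 0
instance (raw : List Int) : Decidable (Pre_expand_rules_py raw) := by
  unfold Pre_expand_rules_py; infer_instance

def pvWitness_expand_rules_py : List Int := [1, 2, 3, -1, 0, 1, 2]

def Spec_expand_rules_py (raw : List Int) (out : List (Int × Int × Int × List Int)) : Prop :=
  out = expand_rules_py_alt raw
instance (raw : List Int) (out : List (Int × Int × Int × List Int)) :
    Decidable (Spec_expand_rules_py raw out) := by unfold Spec_expand_rules_py; infer_instance

-- ===== CLAIM (what is proved, stated in full; the proofs are below) =====
def Claim_equal_expand_rules_py : Prop :=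
  ∀ (raw : List Int), Dom_expand_rules_py raw → Pre_expand_rules_py raw →
    Spec_expand_rules_py raw (expand_rules_py raw)

-- ===== LEMMAS AND PROOFS =====

-- the grammar of a tight rules table: records of 3 header ints followed by a run of negatives
def pyWF : List Int → Bool
  | [] => true
  | _ :: _ :: _ :: rest => pyWF (rest.dropWhile (fun x => x < 0))
  | _ => false
termination_by l => l.length
decreasing_by
  have := List.length_dropWhile_le (fun x : Int => x < 0) rest
  simp; omega

-- reference parse, structural on the list
def specA : List Int → List (Int × Int × Int × List Int)
  | [] => []
  | a :: b :: c :: rest =>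
      (a, b, c, rest.takeWhile (fun x => x < 0)) :: specA (rest.dropWhile (fun x => x < 0))
  | _ => []
termination_by l => l.length
decreasing_by
  have := List.length_dropWhile_le (fun x : Int => x < 0) rest
  simp; omega

theorem dropWhile_eq_drop {p : Int → Bool} : ∀ l : List Int,
    l.dropWhile p = l.drop (l.takeWhile p).length := by
  intro l; induction l with
  | nil => simp
  | cons x xs ih =>
    by_cases h : p x <;> simp [h, ih]

theorem aInner_eq (raw : List Int) : ∀ (fuel i : Nat) (view : List Int),
    raw.length - i ≤ fuel →
    aInner fuel raw i view =
      (view ++ (raw.drop i).takeWhile (fun x => x < 0),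
       i + ((raw.drop i).takeWhile (fun x => x < 0)).length) := by
  intro fuel
  induction fuel with
  | zero =>
    intro i view hle
    have hd : raw.drop i = [] := List.drop_eq_nil_of_le (by omega)
    simp [aInner, hd]
  | succ fuel ih =>
    intro i view hle
    by_cases h : i < raw.length
    · rw [aInner]
      by_cases hneg : raw[i] < 0
      · rw [List.drop_eq_getElem_cons h, List.takeWhile_cons]
        simp only [h, hneg, dif_pos, if_pos, decide_true]
        rw [ih (i + 1) (view ++ [raw[i]]) (by omega)]
        simp
        omega
      · rw [List.drop_eq_getElem_cons h, List.takeWhile_cons]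
        simp [h, hneg]
    · rw [aInner]
      have hd : raw.drop i = [] := List.drop_eq_nil_of_le (by omega)
      simp [h, hd]

theorem aLoop_eq_aux (raw : List Int) : ∀ (fuel i : Nat), raw.length - i ≤ fuel →
    pyWF (raw.drop i) = true → aLoop fuel raw i = specA (raw.drop i) := by
  intro fuel
  induction fuel with
  | zero =>
    intro i hle hwf
    rw [aLoop]
    simp [List.drop_eq_nil_of_le (by omega : raw.length ≤ i), specA]
  | succ n ihn =>
    intro i hle hwf
    by_cases h : i < raw.length
    · rcases hd : raw.drop i with _ | ⟨a, _ | ⟨b, _ | ⟨c, tl⟩⟩⟩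
      · exfalso
        have := List.length_drop (l := raw) (i := i)
        rw [hd] at this; simp at this; omega
      · rw [hd] at hwf; simp [pyWF] at hwf
      · rw [hd] at hwf; simp [pyWF] at hwf
      · have htl : raw.drop (i + 3) = tl := by
          have : List.drop 3 (List.drop i raw) = List.drop (i + 3) raw := List.drop_drop
          rw [hd] at this; simpa using this.symm
        have htake : (raw.drop i).take 3 = [a, b, c] := by rw [hd]; rfl
        rw [aLoop, if_pos h, htake]
        have hiv := aInner_eq raw raw.length (i + 3) [] (by omega)
        rw [htl] at hiv
        have hlen : (tl.takeWhile (fun x => x < 0)).length ≤ tl.length :=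
          (List.takeWhile_sublist _).length_le
        have hltl : tl.length = raw.length - i - 3 := by
          have := List.length_drop (l := raw) (i := i)
          rw [hd] at this; simp at this; omega
        have hdw : raw.drop (i + 3 + (tl.takeWhile (fun x => x < 0)).length)
            = tl.dropWhile (fun x => x < 0) := by
          rw [dropWhile_eq_drop]
          have : List.drop (tl.takeWhile (fun x => x < 0)).length (List.drop (i + 3) raw)
              = List.drop (i + 3 + (tl.takeWhile (fun x => x < 0)).length) raw :=
            List.drop_drop
          rw [htl] at this
          exact this.symm
        have hwf' : pyWF (tl.dropWhile (fun x => x < 0)) = true := by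
          rw [hd] at hwf; rw [pyWF] at hwf; exact hwf
        have hrec := ihn (i + 3 + (tl.takeWhile (fun x => x < 0)).length)
          (by omega) (by rw [hdw]; exact hwf')
        simp only [hiv, specA, List.nil_append]
        rw [hrec, hdw]
    · rw [aLoop]
      simp [h, List.drop_eq_nil_of_le (by omega : raw.length ≤ i), specA]

theorem a_eq_spec (raw : List Int) (hwf : pyWF raw = true) :
    expand_rules_py raw = specA raw := by
  have := aLoop_eq_aux raw raw.length 0 (by omega) (by simpa using hwf)
  simpa [expand_rules_py] using this

theorem b_base :
    ((∀ (hdr : List Int) (acc : List (Int × Int × Int × List Int)),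
        hdr.length < 3 → pyWF (hdr ++ ([] : List Int)) = true →
        bFin (([] : List Int).foldl bStep (hdr, none, acc)) = acc ++ specA (hdr ++ [])) ∧
     (∀ (a b c : Int) (v : List Int) (acc : List (Int × Int × Int × List Int)),
        pyWF (([] : List Int).dropWhile (fun x => x < 0)) = true →
        bFin (([] : List Int).foldl bStep ([a, b, c], some v, acc)) =
          acc ++ (a, b, c, v ++ ([] : List Int).takeWhile (fun x => x < 0)) ::
            specA (([] : List Int).dropWhile (fun x => x < 0)))) := by
  constructor
  · intro hdr acc hlt hwf
    rcases hdr with _ | ⟨a, _ | ⟨b, _ | ⟨c, tl⟩⟩⟩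
    · simp [bFin, specA]
    · simp [pyWF] at hwf
    · simp [pyWF] at hwf
    · simp at hlt; omega
  · intro a b c v acc _
    simp [bFin, specA]

-- joint invariant for B's fold: header-collecting state and open-record state
theorem b_joint (n : Nat) : ∀ rest : List Int, rest.length ≤ n →
    ((∀ (hdr : List Int) (acc : List (Int × Int × Int × List Int)),
        hdr.length < 3 → pyWF (hdr ++ rest) = true →
        bFin (rest.foldl bStep (hdr, none, acc)) = acc ++ specA (hdr ++ rest)) ∧
     (∀ (a b c : Int) (v : List Int) (acc : List (Int × Int × Int × List Int)),
        pyWF (rest.dropWhile (fun x => x < 0)) = true →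
        bFin (rest.foldl bStep ([a, b, c], some v, acc)) =
          acc ++ (a, b, c, v ++ rest.takeWhile (fun x => x < 0)) ::
            specA (rest.dropWhile (fun x => x < 0)))) := by
  induction n with
  | zero =>
    intro rest hle
    have hr : rest = [] := List.eq_nil_of_length_eq_zero (by omega)
    subst hr
    exact b_base
  | succ n ihn =>
    intro rest hle
    rcases rest with _ | ⟨x, rest1⟩
    · exact b_base
    · have hle1 : rest1.length ≤ n := by simp at hle; omega
      constructor
      · intro hdr acc hlt hwf
        rcases hdr with _ | ⟨a, _ | ⟨b, _ | ⟨c, tl⟩⟩⟩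
        · -- header gains its first field
          simp only [List.foldl_cons]
          have hstep : bStep ([], none, acc) x = ([x], none, acc) := by
            simp [bStep]
          rw [hstep]
          have := (ihn rest1 hle1).1 [x] acc (by simp) (by simpa using hwf)
          simpa using this
        · simp only [List.foldl_cons]
          have hstep : bStep ([a], none, acc) x = ([a, x], none, acc) := by
            simp [bStep]
          rw [hstep]
          have := (ihn rest1 hle1).1 [a, x] acc (by simp) (by simpa using hwf)
          simpa using this
        · -- third field completes the header; record opens
          simp only [List.foldl_cons]
          have hstep : bStep ([a, b], none, acc) x = ([a, b, x], some [], acc) := by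
            simp [bStep]
          rw [hstep]
          have hwf' : pyWF (rest1.dropWhile (fun x => x < 0)) = true := by
            simp only [List.cons_append, List.nil_append] at hwf
            rw [pyWF] at hwf; exact hwf
          have := (ihn rest1 hle1).2 a b x [] acc hwf'
          rw [this]
          simp only [List.cons_append, List.nil_append]
          rw [specA]
        · simp at hlt; omega
      · intro a b c v acc hwf
        simp only [List.foldl_cons]
        by_cases hx : x < 0
        · have hstep : bStep ([a, b, c], some v, acc) x = ([a, b, c], some (v ++ [x]), acc) := by
            simp [bStep, hx]
          rw [hstep]
          have hwf' : pyWF (rest1.dropWhile (fun x => x < 0)) = true := by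
            simpa [List.dropWhile_cons, hx] using hwf
          have := (ihn rest1 hle1).2 a b c (v ++ [x]) acc hwf'
          rw [this]
          simp [hx]
        · -- first nonnegative after a complete record: flush and start a new header
          have hstep : bStep ([a, b, c], some v, acc) x
              = ([x], none, acc ++ [(a, b, c, v)]) := by
            simp [bStep, hx]
          rw [hstep]
          have hwf' : pyWF ([x] ++ rest1) = true := by
            simpa [List.dropWhile_cons, hx] using hwf
          have := (ihn rest1 hle1).1 [x] (acc ++ [(a, b, c, v)]) (by simp) hwf'
          rw [this]
          simp [hx]

theorem b_eq_spec (raw : List Int) (hwf : pyWF raw = true) :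
    expand_rules_py_alt raw = specA raw := by
  have := (b_joint raw.length raw (le_refl _)).1 [] [] (by simp) (by simpa using hwf)
  simpa [expand_rules_py_alt] using this

theorem wf_bridge (n : Nat) : ∀ l : List Int, l.length ≤ n →
    List.foldl wfStep 0 l = 0 → pyWF (l.dropWhile (fun x => x < 0)) = true := by
  induction n with
  | zero =>
    intro l hle _
    have hl : l = [] := by cases l <;> simp_all
    subst hl; simp [pyWF]
  | succ n ihn =>
    intro l hle hq
    rcases l with _ | ⟨x, r⟩
    · simp [pyWF]
    · by_cases hx : x < 0
      · have hstep : wfStep 0 x = 0 := by simp [wfStep, hx]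
        rw [List.foldl_cons, hstep] at hq
        have := ihn r (by simp at hle; omega) hq
        simpa [List.dropWhile_cons, hx] using this
      · have hstep : wfStep 0 x = 2 := by simp [wfStep, hx]
        rw [List.foldl_cons, hstep] at hq
        rcases r with _ | ⟨b, r2⟩
        · simp at hq
        · rcases r2 with _ | ⟨c, r3⟩
          · simp [wfStep] at hq
          · have hq3 : List.foldl wfStep 0 r3 = 0 := by simpa [wfStep] using hq
            have hrec := ihn r3 (by simp at hle; omega) hq3
            have hwf : pyWF (x :: b :: c :: r3) = true := by rw [pyWF]; exact hrec
            simpa [List.dropWhile_cons, hx] using hwf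

theorem pre_imp_pyWF (raw : List Int) (h : Pre_expand_rules_py raw) : pyWF raw = true := by
  unfold Pre_expand_rules_py at h
  rcases h with h | h
  · subst h; simp [pyWF]
  · rcases raw with _ | ⟨a, r⟩
    · simp [pyWF]
    · have hstep : wfStep 3 a = 2 := by simp [wfStep]
      rw [List.foldl_cons, hstep] at h
      rcases r with _ | ⟨b, r2⟩
      · simp at h
      · rcases r2 with _ | ⟨c, r3⟩
        · simp [wfStep] at h
        · have hq3 : List.foldl wfStep 0 r3 = 0 := by simpa [wfStep] using h
          rw [pyWF]
          exact wf_bridge r3.length r3 (le_refl _) hq3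

-- ===== VERDICT (by name: the statement is the Claim_ definition above) =====
theorem expand_rules_py_spec : Claim_equal_expand_rules_py := by
  intro raw _ hpre
  have hwf := pre_imp_pyWF raw hpre
  unfold Spec_expand_rules_py
  rw [a_eq_spec raw hwf, b_eq_spec raw hwf]
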